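-- pv_equiv track=rewrite | github.com/21jagerard/COSC_001 | Exam 2 Prep/Nested Loops/P6.py | max_num_seqs
-- ===== SOURCE A (Python) =====
-- def find_max(glist):
--     max = glist[0]
--     for x in glist:
--         if x > max:
--             max = x
--
--     return max
--
-- def max_num_seqs(glist):
--     max = find_max(glist)
--     res = []
--
--     max_count = 1
--
--     for i in range(len(glist)):
--         x = glist[i]
--         #make the longest possible sequence
--         #starting from x going in forward direction
--         #and keep the count
--         curr_count = 1
--         curr_seq = [x]
--
--         #Try expanding the sequence for x
--         #starting from x+1 till max element in
--         #the list
--         for y in range(x+1, max+1):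
--             if y in glist:
--                 curr_count = curr_count + 1
--                 curr_seq.append(y)
--             else:
--                 break
--
--         #check if curr_count is bigger than
--         #max_count then update max_count and
--         #max_seq
--         if curr_count > max_count:
--             max_count = curr_count
--             res = [] #remove all old sequences
--             #add the curr_seq to result
--             res.append(list(curr_seq))
--         elif curr_count == max_count:
--             #if it was equal to max_count
--             #thenadd to result list
--             res.append(list(curr_seq))
--
--     return res
-- ===== SOURCE B (Python) =====
-- def max_num_seqs(glist):
--     s = set(glist)
--     memo = {}
--     for v in sorted(s, reverse=True):
--         memo[v] = memo.get(v + 1, 0) + 1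
--     best = max(memo[x] for x in glist)
--     return [list(range(x, x + best)) for x in glist if memo[x] == best]
-- ===== Notes on version B (the rewrite author's own statement) =====
-- stated objective: faster
-- what changed: A grows each element's run with repeated 'y in glist' linear scans inside a nested loop; B builds a set and a run-length dict once over the distinct values sorted descending (memo[v] = memo.get(v+1,0)+1), then selects the winners in one filter pass.
import Mathlib
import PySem

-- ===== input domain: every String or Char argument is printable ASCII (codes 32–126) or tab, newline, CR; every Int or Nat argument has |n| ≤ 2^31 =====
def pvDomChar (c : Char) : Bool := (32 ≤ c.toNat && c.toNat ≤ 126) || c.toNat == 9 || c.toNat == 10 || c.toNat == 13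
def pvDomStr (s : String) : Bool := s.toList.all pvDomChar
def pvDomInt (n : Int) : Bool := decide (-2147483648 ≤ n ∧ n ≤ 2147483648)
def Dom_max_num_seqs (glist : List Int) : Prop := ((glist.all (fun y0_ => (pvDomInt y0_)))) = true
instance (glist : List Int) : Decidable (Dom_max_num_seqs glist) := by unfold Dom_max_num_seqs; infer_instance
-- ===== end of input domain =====

-- B replaces A's per-element linear membership scans over the value range by a set plus a
-- run-length dict built once over the distinct values sorted descending, then one filter pass.

-- ===== PORT A =====
-- find_max: max = glist[0]; for x in glist: if x > max: max = x   ([] unreachable: Python raises IndexError there, excluded by Pre_)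
def find_max (glist : List Int) : Int :=
  match glist with
  | [] => 0
  | h :: _ => glist.foldl (fun m x => if x > m then x else m) h

-- inner loop: for y in range(x+1, max+1): if y in glist: count += 1; seq.append(y); else: break
-- (Python's range is a lazy iterator left by `break`; transcribed as a counted recursion over
--  the remaining range length, visiting y = x+1, x+2, … exactly as the for-loop does)
def innerLoopA (glist : List Int) : Nat → Int → Int → List Int → Int × List Int
  | 0, _, cc, cs => (cc, cs)
  | f + 1, y, cc, cs =>
    if glist.contains y then innerLoopA glist f (y + 1) (cc + 1) (cs ++ [y])
    else (cc, cs)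

-- outer loop body: compare curr_count with max_count, reset or extend res
def stepA (glist : List Int) (mx : Int) (st : Int × List (List Int)) (x : Int) : Int × List (List Int) :=
  let r := innerLoopA glist ((mx + 1) - (x + 1)).toNat (x + 1) 1 [x]
  if r.1 > st.1 then (r.1, [r.2])
  else if r.1 == st.1 then (st.1, st.2 ++ [r.2])
  else st

-- for i in range(len(glist)): x = glist[i]  — iterated as the fold over glist's elements in order
def max_num_seqs (glist : List Int) : List (List Int) :=
  (glist.foldl (stepA glist (find_max glist)) (1, [])).2


-- ===== PORT B =====
def max_num_seqs_alt (glist : List Int) : List (List Int) :=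
  let s := PySem.Set.ofList glist
  let memo := (PySem.List.sorted s (fun v => v) true).foldl
    (fun (d : PySem.Dict Int Int) v => d.insert v (d.getD (v + 1) 0 + 1)) PySem.Dict.empty
  let best := (PySem.List.max? (glist.map (fun x => memo.getD x 0)) (fun c => c)).getD 0
  (glist.filter (fun x => memo.getD x 0 == best)).map (fun x => PySem.List.pyRange x (x + best) 1)

-- ===== PRECONDITION & SPEC =====
-- Pre_ excludes only the empty list, on which A raises IndexError (glist[0]) and B raises ValueError (max() of an empty sequence).
def Pre_max_num_seqs (glist : List Int) : Prop := glist ≠ []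
instance (glist : List Int) : Decidable (Pre_max_num_seqs glist) := by unfold Pre_max_num_seqs; infer_instance
def pvWitness_max_num_seqs : List Int := [1, 2]

def Spec_max_num_seqs (glist : List Int) (out : List (List Int)) : Prop := out = max_num_seqs_alt glist
instance (glist : List Int) (out : List (List Int)) : Decidable (Spec_max_num_seqs glist out) := by unfold Spec_max_num_seqs; infer_instance

-- ===== CLAIM (what is proved, stated in full; the proofs are below) =====
def Claim_equal_max_num_seqs : Prop := ∀ (glist : List Int), Dom_max_num_seqs glist → Pre_max_num_seqs glist → Spec_max_num_seqs glist (max_num_seqs glist)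

-- ===== LEMMAS AND PROOFS =====
theorem fuelF_succ_lt' (s : List Int) (v : Int) (h : (v + 1) ∈ s) :
    (s.filter (fun u => decide (v+1 < u))).length < (s.filter (fun u => decide (v < u))).length := by
  induction s with
  | nil => simp at h
  | cons a t ih =>
    have hmono : (t.filter (fun u => decide (v+1 < u))).length ≤ (t.filter (fun u => decide (v < u))).length :=
      (List.monotone_filter_right t (by intro x hx; simp at hx ⊢; omega)).length_le
    rcases List.mem_cons.mp h with rfl | ha
    · simp only [List.filter_cons]
      have h1 : (decide (v + 1 < v + 1)) = false := by simp
      have h2 : (decide (v < v + 1)) = true := by simp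
      rw [h1, h2]
      simp only [List.length_cons, if_false, if_true, Bool.false_eq_true]
      omega
    · have := ih ha
      simp only [List.filter_cons]
      by_cases h1 : v + 1 < a
      · have h2 : v < a := by omega
        simp only [h1, h2, decide_true, if_true, List.length_cons]; omega
      · by_cases h2 : v < a
        · simp only [h1, h2, decide_true, decide_false, Bool.false_eq_true, if_false, if_true, List.length_cons]; omega
        · simp only [h1, h2, decide_false, Bool.false_eq_true, if_false]; omega
def rlen (t : List Int) : Nat → Int → Int
  | 0, _ => 1
  | f + 1, v => if t.contains (v + 1) then rlen t f (v + 1) + 1 else 1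
def fuelF (s : List Int) (v : Int) : Nat := (s.filter (fun u => decide (v < u))).length

theorem fuelF_pos' (s : List Int) (v : Int) (h : (v + 1) ∈ s) : 0 < fuelF s v :=
  List.length_pos_of_mem (List.mem_filter.mpr ⟨h, by simp⟩)

theorem not_mem_of_fuelF_eq_zero (s : List Int) (v : Int) (h : fuelF s v = 0) : ¬ (v + 1) ∈ s :=
  fun hm => by have := fuelF_pos' s v hm; omega

theorem rlen_stable' (s : List Int) :
    ∀ (f g : Nat) (v : Int), fuelF s v ≤ f → fuelF s v ≤ g → rlen s f v = rlen s g v := by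
  intro f
  induction f with
  | zero =>
    intro g v hf hg
    have hnm : ¬ (v + 1) ∈ s := not_mem_of_fuelF_eq_zero s v (by omega)
    have hc : s.contains (v + 1) = false := by simpa using hnm
    cases g with
    | zero => simp [rlen]
    | succ g => simp only [rlen]; rw [hc]; simp
  | succ f ih =>
    intro g v hf hg
    cases g with
    | zero =>
      have hnm : ¬ (v + 1) ∈ s := not_mem_of_fuelF_eq_zero s v (by omega)
      have hc : s.contains (v + 1) = false := by simpa using hnm
      simp only [rlen]; rw [hc]; simp
    | succ g =>
      simp only [rlen]
      by_cases hm : (v + 1) ∈ s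
      · have hc : s.contains (v + 1) = true := by simpa using hm
        rw [hc]
        have hlt : fuelF s (v + 1) < fuelF s v := fuelF_succ_lt' s v hm
        have h1 : rlen s f (v + 1) = rlen s g (v + 1) :=
          ih g (v + 1) (by omega) (by omega)
        rw [h1]
      · have hc : s.contains (v + 1) = false := by simpa using hm
        rw [hc]; simp
theorem rlen_pos' (t : List Int) (f : Nat) (v : Int) : 1 ≤ rlen t f v := by
  cases f with
  | zero => simp [rlen]
  | succ f =>
    simp only [rlen]
    split
    · have := rlen_pos' t f (v + 1); omega
    · omega

theorem innerLoopA_eq' (glist : List Int) (mx : Int) :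
    ∀ (n : Nat) (v : Int), (mx - v).toNat = n →
    ∀ (c : Int) (cs : List Int),
      innerLoopA glist n (v + 1) c cs
        = (c + (rlen glist n v - 1), cs ++ PySem.List.pyRange (v + 1) (v + rlen glist n v) 1) := by
  intro n
  induction n with
  | zero =>
    intro v hn c cs
    rw [PySem.List.pyRange_one_eq_nil (by simp [rlen])]
    simp [innerLoopA, rlen]
  | succ n ih =>
    intro v hn c cs
    have hlt : v < mx := by omega
    simp only [innerLoopA, rlen]
    by_cases hm : glist.contains (v + 1) = true
    · rw [if_pos hm, if_pos hm]
      have := ih (v + 1) (by omega) (c + 1) (cs ++ [v + 1])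
      rw [this]
      have hp := rlen_pos' glist n (v + 1)
      have e1 : v + (rlen glist n (v + 1) + 1) = (v + 1) + rlen glist n (v + 1) := by ring
      rw [e1]
      rw [show PySem.List.pyRange (v + 1) (v + 1 + rlen glist n (v + 1)) 1
            = (v + 1) :: PySem.List.pyRange (v + 1 + 1) (v + 1 + rlen glist n (v + 1)) 1
          from PySem.List.pyRange_one_cons (by omega)]
      refine Prod.ext ?_ ?_
      · simp only; omega
      · simp [List.append_assoc]
    · rw [if_neg hm, if_neg hm]
      rw [PySem.List.pyRange_one_eq_nil (by omega)]
      simp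
theorem memo_loop' (s : List Int) :
    ∀ (l : List Int) (d : PySem.Dict Int Int),
      l.Pairwise (· > ·) → (∀ u ∈ l, u ∈ s) →
      (∀ w ∈ s, w ∉ l → ∀ u ∈ l, u < w) →
      (∀ w, d.getD w 0 = if w ∈ s ∧ w ∉ l then rlen s (fuelF s w) w else 0) →
      ∀ w, (l.foldl (fun (d : PySem.Dict Int Int) v => d.insert v (d.getD (v + 1) 0 + 1)) d).getD w 0
            = if w ∈ s then rlen s (fuelF s w) w else 0 := by
  intro l
  induction l with
  | nil =>
    intro d _ _ _ hd w
    simpa using hd w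
  | cons v t ih =>
    intro d hpw hsub hsplit hd w
    simp only [List.foldl_cons]
    have hvt : ∀ u ∈ t, v > u := by
      intro u hu; exact (List.pairwise_cons.mp hpw).1 u hu
    apply ih
    · exact (List.pairwise_cons.mp hpw).2
    · intro u hu; exact hsub u (List.mem_cons_of_mem v hu)
    · intro w hw hwt u hu
      by_cases hwv : w = v
      · subst hwv; exact hvt u hu
      · exact hsplit w hw (by simp [hwv, hwt]) u (List.mem_cons_of_mem v hu)
    · intro w
      rw [PySem.Dict.getD_insert]
      by_cases hwv : w = v
      · subst hwv
        rw [if_pos rfl]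
        have hvs : w ∈ s := hsub w (List.mem_cons_self)
        have hwnt : w ∉ t := by intro hm; have := hvt w hm; omega
        rw [if_pos ⟨hvs, hwnt⟩, hd (w + 1)]
        by_cases hw1 : (w + 1) ∈ s
        · have hnl : (w + 1) ∉ (w :: t) := by
            intro hm
            rcases List.mem_cons.mp hm with h | h
            · omega
            · have := hvt (w + 1) h; omega
          rw [if_pos ⟨hw1, hnl⟩]
          have hF : 0 < fuelF s w := fuelF_pos' s w hw1
          obtain ⟨k, hk⟩ : ∃ k, fuelF s w = k + 1 := ⟨fuelF s w - 1, by omega⟩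
          rw [hk]
          simp only [rlen]
          rw [if_pos (by simpa using hw1)]
          have hlt : fuelF s (w + 1) < fuelF s w := fuelF_succ_lt' s w hw1
          rw [rlen_stable' s (fuelF s (w + 1)) k (w + 1) (le_refl _) (by omega)]
        · rw [if_neg (by intro h; exact hw1 h.1)]
          have hc : s.contains (w + 1) = false := by simpa using hw1
          cases hF : fuelF s w with
          | zero => simp [rlen]
          | succ k => simp only [rlen]; rw [hc]; simp
      · rw [if_neg hwv, hd w]
        have hiff : (w ∈ s ∧ w ∉ v :: t) ↔ (w ∈ s ∧ w ∉ t) := by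
          constructor
          · rintro ⟨h1, h2⟩; exact ⟨h1, fun hm => h2 (List.mem_cons_of_mem v hm)⟩
          · rintro ⟨h1, h2⟩; exact ⟨h1, by simp [hwv, h2]⟩
        by_cases hcond : w ∈ s ∧ w ∉ t
        · rw [if_pos (hiff.mpr hcond), if_pos hcond]
        · rw [if_neg (fun h => hcond (hiff.mp h)), if_neg hcond]
theorem foldG' (c : Int → Int) (q : Int → List Int) :
    ∀ (p : List Int) (M : Int) (res : List (List Int)),
      p.foldl (fun st x => if c x > st.1 then (c x, [q x])
                           else if c x == st.1 then (st.1, st.2 ++ [q x]) else st) (M, res)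
        = (p.foldl (fun m y => max m (c y)) M,
           (if p.foldl (fun m y => max m (c y)) M = M then res else [])
             ++ (p.filter (fun y => c y == p.foldl (fun m y => max m (c y)) M)).map q) := by
  intro p
  induction p with
  | nil => intro M res; simp
  | cons y t ih =>
    intro M res
    simp only [List.foldl_cons, List.filter_cons]
    by_cases h1 : c y > M
    · rw [if_pos h1, ih (c y) [q y]]
      have hmax : max M (c y) = c y := by omega
      simp only [hmax]
      have hle := (PySem.List.le_foldl_max_int t c (c y)).1
      generalize hG : List.foldl (fun m y => max m (c y)) (c y) t = N at hle ⊢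
      rw [if_neg (show N ≠ M by omega)]
      by_cases h2 : N = c y
      · rw [if_pos h2, if_pos (by simp [h2])]
        simp
      · rw [if_neg h2, if_neg (by simp; omega)]
    · rw [if_neg h1]
      have hmax : max M (c y) = M := by omega
      simp only [hmax]
      have hle := (PySem.List.le_foldl_max_int t c M).1
      by_cases h2 : (c y == M) = true
      · rw [if_pos h2, ih M (res ++ [q y])]
        have hcy : c y = M := by simpa using h2
        generalize hG : List.foldl (fun m y => max m (c y)) M t = N at hle ⊢
        by_cases h3 : N = M
        · rw [if_pos h3, if_pos h3, if_pos (by simp [hcy, h3])]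
          simp
        · rw [if_neg h3, if_neg h3, if_neg (by simp [hcy]; omega)]
      · rw [if_neg h2, ih M res]
        have hcy : ¬ c y = M := by simpa using h2
        generalize hG : List.foldl (fun m y => max m (c y)) M t = N at hle ⊢
        have hne : (c y == N) = false := by simp; omega
        rw [hne]
        simp
theorem find_max_ub (h : Int) (t : List Int) : ∀ y ∈ h :: t, y ≤ find_max (h :: t) := by
  have he : (fun (m x : Int) => if x > m then x else m) = (fun m x => max m x) := by
    funext m x; split_ifs <;> omega
  have : find_max (h :: t) = (h :: t).foldl max h := by
    simp only [find_max, he]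
  rw [this]
  simp only [List.foldl_cons, max_self]
  intro y hy
  rcases List.mem_cons.mp hy with rfl | hy
  · exact (PySem.List.le_foldl_max t y).1
  · exact (PySem.List.le_foldl_max t h).2 y hy

theorem contains_ofList_eq (glist : List Int) :
    ∀ u, (PySem.Set.ofList glist : List Int).contains u = glist.contains u := by
  intro u
  by_cases hu : u ∈ glist
  · have h1 : u ∈ (PySem.Set.ofList glist : List Int) := (PySem.Set.mem_ofList glist u).mpr hu
    simp [hu, h1]
  · have h1 : u ∉ (PySem.Set.ofList glist : List Int) := fun hm => hu ((PySem.Set.mem_ofList glist u).mp hm)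
    simp [hu, h1]

theorem fuelF_le (glist : List Int) (x mx : Int) (hub : ∀ y ∈ glist, y ≤ mx) :
    fuelF (PySem.Set.ofList glist) x ≤ (mx - x).toNat := by
  set s : List Int := PySem.Set.ofList glist with hs
  have hnd : (s.filter (fun u => decide (x < u))).Nodup :=
    (PySem.Set.nodup_ofList glist).filter _
  have hsub : (s.filter (fun u => decide (x < u))) ⊆ PySem.List.pyRange (x + 1) (mx + 1) 1 := by
    intro u hu
    have h1 := List.mem_filter.mp hu
    have h2 : u ∈ glist := (PySem.Set.mem_ofList glist u).mp h1.1
    have h3 : x < u := by simpa using h1.2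
    exact PySem.List.mem_pyRange_one.mpr ⟨by omega, by have := hub u h2; omega⟩
  have := (List.subperm_of_subset hnd hsub).length_le
  unfold fuelF
  rw [PySem.List.length_pyRange_one] at this
  omega
theorem memo_getD (glist : List Int) : ∀ w : Int,
    ((PySem.List.sorted (PySem.Set.ofList glist : List Int) (fun v => v) true).foldl
      (fun (d : PySem.Dict Int Int) v => d.insert v (d.getD (v + 1) 0 + 1)) PySem.Dict.empty).getD w 0
    = if w ∈ (PySem.Set.ofList glist : List Int)
      then rlen (PySem.Set.ofList glist) (fuelF (PySem.Set.ofList glist) w) w else 0 := by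
  set s : List Int := PySem.Set.ofList glist with hs
  set l : List Int := PySem.List.sorted s (fun v => v) true with hl
  have hperm : l.Perm s := PySem.List.sorted_perm s (fun v => v) true
  have hnd : l.Nodup := hperm.nodup_iff.mpr (PySem.Set.nodup_ofList glist)
  have hge : l.Pairwise (fun a b => b ≤ a) := PySem.List.sorted_pairwise_rev s (fun v => v)
  have hgt : l.Pairwise (· > ·) := by
    have := hge.and hnd
    exact this.imp (by intro a b h; rcases h with ⟨h1, h2⟩; omega)
  apply memo_loop' s l PySem.Dict.empty hgt
  · intro u hu; exact hperm.mem_iff.mp hu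
  · intro w hw hwl u hu
    exact absurd (hperm.mem_iff.mpr hw) hwl
  · intro w
    rw [if_neg (by rintro ⟨h1, h2⟩; exact h2 (hperm.mem_iff.mpr h1))]
    simp [PySem.Dict.getD_empty]
theorem rlen_congr2 (t t' : List Int) (h : ∀ u, t.contains u = t'.contains u) :
    ∀ (f : Nat) (v : Int), rlen t f v = rlen t' f v := by
  intro f
  induction f with
  | zero => intro v; simp [rlen]
  | succ f ih => intro v; simp only [rlen, h, ih]

def cntD (glist : List Int) (x : Int) : Int := rlen glist ((find_max glist - x).toNat) x
def sqD (glist : List Int) (x : Int) : List Int := PySem.List.pyRange x (x + cntD glist x) 1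

theorem bridge (glist : List Int) (x : Int) (hx : x ∈ glist)
    (hub : ∀ y ∈ glist, y ≤ find_max glist) :
    ((PySem.List.sorted (PySem.Set.ofList glist : List Int) (fun v => v) true).foldl
      (fun (d : PySem.Dict Int Int) v => d.insert v (d.getD (v + 1) 0 + 1)) PySem.Dict.empty).getD x 0
    = cntD glist x := by
  rw [memo_getD glist x, if_pos ((PySem.Set.mem_ofList glist x).mpr hx)]
  rw [rlen_stable' (PySem.Set.ofList glist) (fuelF (PySem.Set.ofList glist) x)
        ((find_max glist - x).toNat) x (le_refl _) (fuelF_le glist x (find_max glist) hub)]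
  exact rlen_congr2 _ _ (contains_ofList_eq glist) _ x

theorem stepA_eq (gl : List Int) (st : Int × List (List Int)) (x : Int) :
    stepA gl (find_max gl) st x
      = (if cntD gl x > st.1 then (cntD gl x, [sqD gl x])
         else if cntD gl x == st.1 then (st.1, st.2 ++ [sqD gl x]) else st) := by
  have hr := innerLoopA_eq' gl (find_max gl) ((find_max gl - x).toNat) x rfl 1 [x]
  have hp := rlen_pos' gl ((find_max gl - x).toNat) x
  have hfe : (find_max gl + 1) - (x + 1) = find_max gl - x := by ring
  simp only [stepA, hfe, hr]
  have hc1 : 1 + (rlen gl ((find_max gl - x).toNat) x - 1) = cntD gl x := by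
    unfold cntD; omega
  have hc2 : [x] ++ PySem.List.pyRange (x + 1) (x + rlen gl ((find_max gl - x).toNat) x) 1
      = sqD gl x := by
    unfold sqD
    rw [PySem.List.pyRange_one_cons (a := x) (b := x + cntD gl x) (by unfold cntD; omega)]
    unfold cntD
    simp
  rw [hc1, hc2]

theorem main_eq (glist : List Int) (hpre : glist ≠ []) :
    max_num_seqs glist = max_num_seqs_alt glist := by
  obtain ⟨h, t, rfl⟩ : ∃ h t, glist = h :: t := by
    cases glist with
    | nil => exact absurd rfl hpre
    | cons h t => exact ⟨h, t, rfl⟩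
  have hub := find_max_ub h t
  -- A side
  have hA : max_num_seqs (h :: t)
      = ((h :: t).filter (fun y => cntD (h :: t) y
            == (h :: t).foldl (fun m y => max m (cntD (h :: t) y)) 1)).map (sqD (h :: t)) := by
    unfold max_num_seqs
    have hfold := PySem.List.foldl_congr_mem
      (l := h :: t) (init := ((1 : Int), ([] : List (List Int))))
      (f := stepA (h :: t) (find_max (h :: t)))
      (g := fun st x => if cntD (h :: t) x > st.1 then (cntD (h :: t) x, [sqD (h :: t) x])
            else if cntD (h :: t) x == st.1 then (st.1, st.2 ++ [sqD (h :: t) x]) else st)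
      (fun acc x _ => stepA_eq (h :: t) acc x)
    rw [hfold, foldG' (cntD (h :: t)) (sqD (h :: t)) (h :: t) 1 []]
    by_cases hM : (h :: t).foldl (fun m y => max m (cntD (h :: t) y)) 1 = 1 <;> simp [hM]
  -- B side
  have hbr : ∀ x ∈ (h :: t),
      ((PySem.List.sorted (PySem.Set.ofList (h :: t) : List Int) (fun v => v) true).foldl
        (fun (d : PySem.Dict Int Int) v => d.insert v (d.getD (v + 1) 0 + 1)) PySem.Dict.empty).getD x 0
      = cntD (h :: t) x := fun x hx => bridge (h :: t) x hx hub
  rw [hA]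
  simp only [max_num_seqs_alt]
  set memo := ((PySem.List.sorted (PySem.Set.ofList (h :: t) : List Int) (fun v => v) true).foldl
      (fun (d : PySem.Dict Int Int) v => d.insert v (d.getD (v + 1) 0 + 1)) PySem.Dict.empty) with hmemo
  have hmap : (h :: t).map (fun x => memo.getD x 0) = cntD (h :: t) h :: t.map (cntD (h :: t)) := by
    rw [List.map_congr_left hbr]
    simp
  have hbest : (PySem.List.max? ((h :: t).map (fun x => memo.getD x 0)) (fun c => c)).getD 0
      = (h :: t).foldl (fun m y => max m (cntD (h :: t) y)) 1 := by
    rw [hmap, PySem.List.max?_id_cons]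
    simp only [Option.getD_some]
    rw [List.foldl_map]
    simp only [List.foldl_cons]
    rw [show max 1 (cntD (h :: t) h) = cntD (h :: t) h from by
      have := rlen_pos' (h :: t) ((find_max (h :: t) - h).toNat) h
      unfold cntD; omega]
  rw [hbest]
  have hfilt : (h :: t).filter (fun x => memo.getD x 0
        == (h :: t).foldl (fun m y => max m (cntD (h :: t) y)) 1)
      = (h :: t).filter (fun y => cntD (h :: t) y
        == (h :: t).foldl (fun m y => max m (cntD (h :: t) y)) 1) := by
    apply List.filter_congr
    intro x hx
    rw [hbr x hx]
  rw [hfilt]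
  apply List.map_congr_left
  intro x hx
  have hmem := List.mem_filter.mp hx
  have heq : cntD (h :: t) x = (h :: t).foldl (fun m y => max m (cntD (h :: t) y)) 1 := by
    simpa using hmem.2
  unfold sqD
  rw [← heq]

-- ===== VERDICT (by name: the statement is the Claim_ definition above) =====
theorem max_num_seqs_spec : Claim_equal_max_num_seqs := by
  intro glist _ hpre
  unfold Spec_max_num_seqs
  exact main_eq glist hpre
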